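-- pv_equiv track=rewrite | github.com/monali93/DSCI-553 | Recommendation Systems/Python/task1.py | minhash_function
-- ===== SOURCE A (Python) =====
-- def minhash_function(list_of_users, user_hash_lookup):
--     min_hash_dict = {}
--     for i, u in enumerate(list_of_users):
--         if i != 0:
--             l = user_hash_lookup[u]
--             min_hash_dict = {k: min(v, min_hash_dict[k]) for k, v in l.items()}
--         else:
--             min_hash_dict = user_hash_lookup[u]
--     return min_hash_dict
-- ===== SOURCE B (Python) =====
-- def minhash_function(list_of_users, user_hash_lookup):
--     # Transposed decomposition: key-outer, user-inner per-key minimum.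
--     if not list_of_users:
--         return {}
--     result = {}
--     for k in user_hash_lookup[list_of_users[-1]]:
--         result[k] = min(user_hash_lookup[u][k] for u in list_of_users)
--     return result
-- ===== Notes on version B (the rewrite author's own statement) =====
-- stated objective: alternative
-- what changed: Transposes A's row-wise accumulation (rebuilding the whole min-dict once per user) into a single key-outer pass that takes the last user's keys and computes, for each key, the minimum over all users.
import Mathlib
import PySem

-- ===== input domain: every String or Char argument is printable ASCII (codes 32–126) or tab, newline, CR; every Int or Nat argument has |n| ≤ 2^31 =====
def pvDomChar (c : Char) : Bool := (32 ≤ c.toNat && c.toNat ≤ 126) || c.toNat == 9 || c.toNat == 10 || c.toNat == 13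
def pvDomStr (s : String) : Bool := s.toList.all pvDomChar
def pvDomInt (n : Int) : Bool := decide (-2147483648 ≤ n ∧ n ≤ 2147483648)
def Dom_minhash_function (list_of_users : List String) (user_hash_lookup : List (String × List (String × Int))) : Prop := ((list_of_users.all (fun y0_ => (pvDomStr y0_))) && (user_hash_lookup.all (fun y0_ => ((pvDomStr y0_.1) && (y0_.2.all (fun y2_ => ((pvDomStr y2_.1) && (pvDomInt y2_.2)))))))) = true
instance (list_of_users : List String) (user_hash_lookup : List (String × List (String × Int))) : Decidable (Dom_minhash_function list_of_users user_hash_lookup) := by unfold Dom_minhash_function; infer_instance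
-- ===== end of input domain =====

-- B transposes A's row-wise min-dict accumulation into a key-outer, user-inner per-key minimum pass (alternative decomposition, similar cost).


-- ===== PORT A =====
-- Dicts are PySem.Dict built from the association lists; a `none` accumulator = a raised KeyError.
-- pvAFold is the body of A's `for i, u in enumerate(...)` loop (the dict comprehension is the inner foldl).
def pvAFold (d : PySem.Dict String (List (String × Int))) (acc : Option (PySem.Dict String Int)) (p : Int × String) : Option (PySem.Dict String Int) :=
  match acc with
  | none => none
  | some md =>
    match d.get? p.2 with
    | none => none
    | some l =>
      if p.1 ≠ 0 then
        (PySem.Dict.ofList l).items.foldl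
          (fun (acc2 : Option (PySem.Dict String Int)) kv =>
            match acc2, md.get? kv.1 with
            | some nd, some w => some (nd.insert kv.1 (min kv.2 w))
            | _, _ => none)
          (some PySem.Dict.empty)
      else some (PySem.Dict.ofList l)

def minhash_function (list_of_users : List String) (user_hash_lookup : List (String × List (String × Int))) : List (String × Int) :=
  match (PySem.List.enumerate list_of_users 0).foldl (pvAFold (PySem.Dict.ofList user_hash_lookup)) (some PySem.Dict.empty) with
  | some md => md.items
  | none => []

-- ===== PORT B =====
-- min(user_hash_lookup[u][k] for u in list_of_users): a running minimum; none = KeyError/ValueError.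
def pvMinOverUsers (d : PySem.Dict String (List (String × Int))) (list_of_users : List String) (k : String) : Option Int :=
  match list_of_users with
  | [] => none
  | u :: rest =>
    rest.foldl
      (fun (acc : Option Int) u' =>
        match acc, (d.get? u').bind (fun l => (PySem.Dict.ofList l).get? k) with
        | some m, some v => some (min m v)
        | _, _ => none)
      ((d.get? u).bind (fun l => (PySem.Dict.ofList l).get? k))

-- the body of B's `for k in user_hash_lookup[list_of_users[-1]]` loop
def pvBFold (d : PySem.Dict String (List (String × Int))) (list_of_users : List String) (acc : Option (PySem.Dict String Int)) (k : String) : Option (PySem.Dict String Int) :=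
  match acc, pvMinOverUsers d list_of_users k with
  | some nd, some v => some (nd.insert k v)
  | _, _ => none

def minhash_function_alt (list_of_users : List String) (user_hash_lookup : List (String × List (String × Int))) : List (String × Int) :=
  if list_of_users = [] then []
  else
    let d := PySem.Dict.ofList user_hash_lookup
    match PySem.List.pyGet? list_of_users (-1) with
    | none => []
    | some last =>
      match d.get? last with
      | none => []
      | some ll =>
        match (PySem.Dict.ofList ll).keys.foldl (pvBFold d list_of_users) (some PySem.Dict.empty) with
        | some md => md.items
        | none => []

-- ===== PRECONDITION & SPEC =====
-- Pre_ excludes exactly the inputs where Python A raises KeyError: a listed user missing from the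
-- lookup, or a later user's hash dict containing a key absent from the preceding user's dict.
def Pre_minhash_function (list_of_users : List String) (user_hash_lookup : List (String × List (String × Int))) : Prop :=
  (∀ u ∈ list_of_users, (PySem.Dict.ofList user_hash_lookup).contains u = true) ∧
  ∀ p ∈ list_of_users.zip list_of_users.tail,
    ∀ k ∈ ((PySem.Dict.ofList user_hash_lookup).getD p.2 []).map Prod.fst,
      k ∈ ((PySem.Dict.ofList user_hash_lookup).getD p.1 []).map Prod.fst
instance (list_of_users : List String) (user_hash_lookup : List (String × List (String × Int))) : Decidable (Pre_minhash_function list_of_users user_hash_lookup) := by unfold Pre_minhash_function; infer_instance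
def pvWitness_minhash_function : List String × (List (String × List (String × Int))) :=
  (["u", "v"], [("u", [("a", 3), ("b", 1)]), ("v", [("a", 2)])])
def Spec_minhash_function (list_of_users : List String) (user_hash_lookup : List (String × List (String × Int))) (out : List (String × Int)) : Prop := out = minhash_function_alt list_of_users user_hash_lookup
instance (list_of_users : List String) (user_hash_lookup : List (String × List (String × Int))) (out : List (String × Int)) : Decidable (Spec_minhash_function list_of_users user_hash_lookup out) := by unfold Spec_minhash_function; infer_instance

-- ===== CLAIM (what is proved, stated in full; the proofs are below) =====
def Claim_equal_minhash_function : Prop := ∀ (list_of_users : List String) (user_hash_lookup : List (String × List (String × Int))), Dom_minhash_function list_of_users user_hash_lookup → Pre_minhash_function list_of_users user_hash_lookup → Spec_minhash_function list_of_users user_hash_lookup (minhash_function list_of_users user_hash_lookup)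

-- ===== LEMMAS AND PROOFS =====

-- the per-user hash dict
def pvUd (d : PySem.Dict String (List (String × Int))) (u : String) : PySem.Dict String Int :=
  PySem.Dict.ofList (d.getD u [])

-- pure version of one A step (the dict comprehension)
def pvAStep (d : PySem.Dict String (List (String × Int))) (md : PySem.Dict String Int) (u : String) : PySem.Dict String Int :=
  (pvUd d u).items.foldl (fun nd kv => nd.insert kv.1 (min kv.2 (md.getD kv.1 0))) PySem.Dict.empty

def pvALoop (d : PySem.Dict String (List (String × Int))) (md : PySem.Dict String Int) (us : List String) : PySem.Dict String Int :=
  us.foldl (pvAStep d) md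

-- accumulated minimum along a user list
def pvMin (d : PySem.Dict String (List (String × Int))) (m0 : Int) (us : List String) (k : String) : Int :=
  us.foldl (fun m u => min ((pvUd d u).getD k 0) m) m0

-- key-set inclusion between two users' hash dicts, and the adjacent-pairs chain of Pre_
def pvSub (d : PySem.Dict String (List (String × Int))) (a b : String) : Prop :=
  ∀ k ∈ (pvUd d b).keys, k ∈ (pvUd d a).keys

def pvChain (d : PySem.Dict String (List (String × Int))) (us : List String) : Prop :=
  ∀ p ∈ us.zip us.tail, pvSub d p.1 p.2

theorem pv_mem_keys_ofList {ν : Type} (l : List (String × ν)) (k : String) :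
    k ∈ (PySem.Dict.ofList l).keys ↔ k ∈ l.map Prod.fst := by
  have h : (PySem.Dict.ofList l).keys = PySem.Set.ofList (l.map Prod.fst) := by
    show (List.foldl (fun acc p => acc.insert p.1 p.2) PySem.Dict.empty l).keys = _
    rw [PySem.Dict.keys_foldl_insert_key l Prod.fst (fun _ p => p.2) PySem.Dict.empty]
    simp [PySem.Dict.keys_empty, PySem.Set.update_nil_left]
  rw [h, PySem.Set.mem_ofList]

theorem pv_get?_of_contains (d : PySem.Dict String (List (String × Int))) (u : String)
    (h : d.contains u = true) : d.get? u = some (d.getD u []) := by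
  rw [PySem.Dict.contains_eq_isSome_get?] at h
  obtain ⟨v, hv⟩ := Option.isSome_iff_exists.mp h
  rw [hv, PySem.Dict.getD_eq_get?_getD, hv]
  rfl

theorem pv_keys_pvAStep (d : PySem.Dict String (List (String × Int))) (md : PySem.Dict String Int)
    (u : String) : (pvAStep d md u).keys = (pvUd d u).keys := by
  show (List.foldl (fun nd kv => nd.insert kv.1 (min kv.2 (md.getD kv.1 0))) PySem.Dict.empty (pvUd d u).items).keys = _
  rw [PySem.Dict.keys_foldl_insert_key ((pvUd d u).items) Prod.fst
        (fun nd kv => min kv.2 (md.getD kv.1 0)) PySem.Dict.empty]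
  simp only [PySem.Dict.keys_empty, PySem.Set.update_nil_left]
  exact PySem.Set.ofList_eq_self_of_nodup _ (PySem.Dict.nodup_keys_ofList _)

theorem pv_items_pvAStep (d : PySem.Dict String (List (String × Int))) (md : PySem.Dict String Int)
    (u : String) :
    (pvAStep d md u).items = (pvUd d u).items.map (fun kv => (kv.1, min kv.2 (md.getD kv.1 0))) := by
  show (List.foldl (fun nd kv => nd.insert kv.1 (min kv.2 (md.getD kv.1 0))) PySem.Dict.empty (pvUd d u).items).items = _
  rw [PySem.Dict.items_foldl_insert_fresh ((pvUd d u).items) Prod.fst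
        (fun kv => min kv.2 (md.getD kv.1 0)) PySem.Dict.empty
        (fun a _ => PySem.Dict.contains_empty _)
        (PySem.Dict.nodup_keys_ofList _)]
  simp [PySem.Dict.empty]

theorem pv_getD_pvAStep (d : PySem.Dict String (List (String × Int))) (md : PySem.Dict String Int)
    (u : String) (k : String) (hk : k ∈ (pvUd d u).keys) :
    (pvAStep d md u).getD k 0 = min ((pvUd d u).getD k 0) (md.getD k 0) := by
  have hcd := (PySem.Dict.contains_iff_mem_keys (pvUd d u) k).mpr hk
  rw [PySem.Dict.contains_eq_isSome_get?] at hcd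
  obtain ⟨v, hv⟩ := Option.isSome_iff_exists.mp hcd
  have hmem : (k, v) ∈ (pvUd d u).items :=
    ((PySem.Dict.get?_eq_some_iff_mem_items _ _ _ (PySem.Dict.nodup_keys_ofList _)).mp hv)
  have hvD : (pvUd d u).getD k 0 = v := PySem.Dict.getD_of_mem_items _ hmem (PySem.Dict.nodup_keys_ofList _) 0
  have hmem2 : (k, min v (md.getD k 0)) ∈ (pvAStep d md u).items := by
    rw [pv_items_pvAStep]
    exact List.mem_map.mpr ⟨(k, v), hmem, rfl⟩
  have hndA : (pvAStep d md u).keys.Nodup := by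
    rw [pv_keys_pvAStep]; exact PySem.Dict.nodup_keys_ofList _
  rw [PySem.Dict.getD_of_mem_items _ hmem2 hndA 0, hvD]

theorem pvChain_tail (d : PySem.Dict String (List (String × Int))) (u : String) (us : List String)
    (h : pvChain d (u :: us)) : pvChain d us := by
  intro p hp
  apply h
  cases us with
  | nil => simp at hp
  | cons v vs => exact List.mem_cons_of_mem _ hp

theorem pvChain_last (d : PySem.Dict String (List (String × Int))) :
    ∀ (us : List String) (u : String), pvChain d (u :: us) →
      ∀ w ∈ u :: us, pvSub d w ((u :: us).getLast (by simp)) := by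
  intro us
  induction us with
  | nil =>
    intro u _ w hw
    simp at hw
    subst hw
    intro k hk
    simpa using hk
  | cons v vs ih =>
    intro u hch w hw
    have hlast : (u :: v :: vs).getLast (by simp) = (v :: vs).getLast (by simp) := by
      simp [List.getLast_cons]
    rw [hlast]
    have huv : pvSub d u v := hch (u, v) (by simp)
    have hch' : pvChain d (v :: vs) := pvChain_tail d u (v :: vs) hch
    rcases List.mem_cons.mp hw with rfl | hw'
    · intro k hk
      exact huv k (ih v hch' v (by simp) k hk)
    · exact ih v hch' w hw'

-- the inner comprehension fold succeeds and equals its pure version when every key is present in md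
theorem pv_optFoldA (md : PySem.Dict String Int) :
    ∀ (l : List (String × Int)) (nd0 : PySem.Dict String Int),
      (∀ kv ∈ l, (md.get? kv.1).isSome) →
      l.foldl
        (fun (acc2 : Option (PySem.Dict String Int)) kv =>
          match acc2, md.get? kv.1 with
          | some nd, some w => some (nd.insert kv.1 (min kv.2 w))
          | _, _ => none)
        (some nd0)
      = some (l.foldl (fun nd kv => nd.insert kv.1 (min kv.2 (md.getD kv.1 0))) nd0) := by
  intro l
  induction l with
  | nil => intro nd0 _; rfl
  | cons kv l ih =>
    intro nd0 h
    obtain ⟨w, hw⟩ := Option.isSome_iff_exists.mp (h kv (by simp))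
    have hD : md.getD kv.1 0 = w := by rw [PySem.Dict.getD_eq_get?_getD, hw]; rfl
    simp only [List.foldl_cons, hw, hD]
    exact ih _ (fun kv' h' => h kv' (by simp [h']))

-- A's loop over the users after the first equals the pure loop
theorem pv_ALoop (d : PySem.Dict String (List (String × Int))) :
    ∀ (us : List String) (md : PySem.Dict String Int) (s : Int), 1 ≤ s →
      (∀ u ∈ us, d.contains u = true) →
      (∀ h ∈ us.head?, ∀ k ∈ (pvUd d h).keys, k ∈ md.keys) →
      pvChain d us →
      (PySem.List.enumerate us s).foldl (pvAFold d) (some md) = some (pvALoop d md us) := by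
  intro us
  induction us with
  | nil => intro md s _ _ _ _; rfl
  | cons u rest ih =>
    intro md s hs hlk hhead hch
    rw [PySem.List.enumerate_cons, List.foldl_cons]
    have hc : d.contains u = true := hlk u (by simp)
    have hget := pv_get?_of_contains d u hc
    have hkeys : ∀ kv ∈ (PySem.Dict.ofList (d.getD u [])).items, (md.get? kv.1).isSome := by
      intro kv hkv
      have h1 : kv.1 ∈ (pvUd d u).keys := PySem.Dict.mem_keys_of_mem_items _ hkv
      have h2 : kv.1 ∈ md.keys := hhead u rfl kv.1 h1
      have h3 := (PySem.Dict.contains_iff_mem_keys md kv.1).mpr h2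
      rw [PySem.Dict.contains_eq_isSome_get?] at h3
      exact h3
    have hstep : pvAFold d (some md) (s, u) = some (pvAStep d md u) := by
      unfold pvAFold
      rw [hget]
      dsimp only
      rw [if_pos (by omega : (s : Int) ≠ 0)]
      exact pv_optFoldA md _ _ hkeys
    rw [hstep]
    have hchain' : pvChain d rest := pvChain_tail d u rest hch
    have hALoop : pvALoop d md (u :: rest) = pvALoop d (pvAStep d md u) rest := rfl
    rw [hALoop]
    apply ih (pvAStep d md u) (s + 1) (by omega) (fun w hw => hlk w (by simp [hw]))
    · intro h hh k hk
      rw [pv_keys_pvAStep]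
      cases rest with
      | nil => simp at hh
      | cons v vs =>
        have hh' : v = h := by simpa using hh
        subst hh'
        exact hch (u, v) (by simp) k hk
    · exact hchain'

-- characterization of the pure loop's items
theorem pv_items_pvALoop (d : PySem.Dict String (List (String × Int))) :
    ∀ (us : List String) (u : String) (md : PySem.Dict String Int), pvChain d (u :: us) →
      (pvALoop d md (u :: us)).items =
        (pvUd d ((u :: us).getLast (by simp))).items.map
          (fun kv => (kv.1, pvMin d (md.getD kv.1 0) (u :: us) kv.1)) := by
  intro us
  induction us with
  | nil =>
    intro u md _
    show (pvAStep d md u).items = _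
    rw [pv_items_pvAStep]
    apply List.map_congr_left
    intro kv hkv
    obtain ⟨k, v⟩ := kv
    have hv : (pvUd d u).getD k 0 = v :=
      PySem.Dict.getD_of_mem_items _ hkv (PySem.Dict.nodup_keys_ofList _) 0
    simp only [pvMin, List.foldl_cons, List.foldl_nil, hv]
  | cons v vs ih =>
    intro u md hch
    have h1 : pvALoop d md (u :: v :: vs) = pvALoop d (pvAStep d md u) (v :: vs) := rfl
    rw [h1, ih v (pvAStep d md u) (pvChain_tail d u _ hch)]
    have hlast : (u :: v :: vs).getLast (by simp) = (v :: vs).getLast (by simp) := by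
      simp [List.getLast_cons]
    rw [hlast]
    apply List.map_congr_left
    intro kv hkv
    have hkmem : kv.1 ∈ (pvUd d ((v :: vs).getLast (by simp))).keys :=
      PySem.Dict.mem_keys_of_mem_items _ hkv
    have hku : kv.1 ∈ (pvUd d u).keys := by
      have hsub := pvChain_last d (v :: vs) u hch u (by simp)
      rw [hlast] at hsub
      exact hsub kv.1 hkmem
    have h2 : (pvAStep d md u).getD kv.1 0 = min ((pvUd d u).getD kv.1 0) (md.getD kv.1 0) :=
      pv_getD_pvAStep d md u kv.1 hku
    rw [h2]
    rfl

-- B's running minimum succeeds and equals the pure fold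
theorem pv_minOverUsers (d : PySem.Dict String (List (String × Int))) (k : String) :
    ∀ (u : String) (rest : List String),
      d.contains u = true → k ∈ (pvUd d u).keys →
      (∀ w ∈ rest, d.contains w = true ∧ k ∈ (pvUd d w).keys) →
      pvMinOverUsers d (u :: rest) k =
        some (rest.foldl (fun m w => min m ((pvUd d w).getD k 0)) ((pvUd d u).getD k 0)) := by
  have hval : ∀ w : String, d.contains w = true → k ∈ (pvUd d w).keys →
      (d.get? w).bind (fun l => (PySem.Dict.ofList l).get? k) = some ((pvUd d w).getD k 0) := by
    intro w hcw hkw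
    rw [pv_get?_of_contains d w hcw]
    have hc2 := (PySem.Dict.contains_iff_mem_keys (pvUd d w) k).mpr hkw
    rw [PySem.Dict.contains_eq_isSome_get?] at hc2
    obtain ⟨v, hv⟩ := Option.isSome_iff_exists.mp hc2
    have : (pvUd d w).getD k 0 = v := by rw [PySem.Dict.getD_eq_get?_getD, hv]; rfl
    rw [this]
    exact hv
  intro u rest hcu hku hrest
  have aux : ∀ (rs : List String) (m0 : Int), (∀ w ∈ rs, d.contains w = true ∧ k ∈ (pvUd d w).keys) →
      rs.foldl
        (fun (acc : Option Int) u' =>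
          match acc, (d.get? u').bind (fun l => (PySem.Dict.ofList l).get? k) with
          | some m, some v => some (min m v)
          | _, _ => none)
        (some m0)
      = some (rs.foldl (fun m w => min m ((pvUd d w).getD k 0)) m0) := by
    intro rs
    induction rs with
    | nil => intro m0 _; rfl
    | cons w ws ih =>
      intro m0 h
      obtain ⟨hcw, hkw⟩ := h w (by simp)
      simp only [List.foldl_cons, hval w hcw hkw]
      exact ih _ (fun w' h' => h w' (by simp [h']))
  show rest.foldl _ ((d.get? u).bind (fun l => (PySem.Dict.ofList l).get? k)) = _
  rw [hval u hcu hku]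
  exact aux rest _ hrest

theorem pv_optFoldB (d : PySem.Dict String (List (String × Int))) (lou : List String)
    (vB : String → Int) :
    ∀ (ks : List String) (nd0 : PySem.Dict String Int),
      (∀ k ∈ ks, pvMinOverUsers d lou k = some (vB k)) →
      ks.foldl (pvBFold d lou) (some nd0)
        = some (ks.foldl (fun nd k => nd.insert k (vB k)) nd0) := by
  intro ks
  induction ks with
  | nil => intro nd0 _; rfl
  | cons k ks ih =>
    intro nd0 h
    have hk := h k (by simp)
    simp only [List.foldl_cons, pvBFold, hk]
    exact ih _ (fun k' h' => h k' (by simp [h']))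

theorem pv_items_insertFold (vB : String → Int) (ks : List String) (hnd : ks.Nodup) :
    (ks.foldl (fun nd k => nd.insert k (vB k)) PySem.Dict.empty).items
      = ks.map (fun k => (k, vB k)) := by
  rw [PySem.Dict.items_foldl_insert_fresh ks (fun k => k) vB PySem.Dict.empty
        (fun a _ => PySem.Dict.contains_empty _) (by simpa using hnd)]
  simp [PySem.Dict.empty]

-- ===== VERDICT (by name: the statement is the Claim_ definition above) =====
theorem pv_foldmin_comm (d : PySem.Dict String (List (String × Int))) (k : String)
    (us : List String) (m0 : Int) :
    us.foldl (fun m w => min m ((pvUd d w).getD k 0)) m0 = pvMin d m0 us k := by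
  unfold pvMin
  exact List.foldl_ext _ _ m0 (fun a b _ => min_comm a ((pvUd d b).getD k 0))

-- ===== VERDICT (by name: the statement is the Claim_ definition above) =====
theorem minhash_function_spec : Claim_equal_minhash_function := by
  unfold Claim_equal_minhash_function
  intro lou uhl _ hpre
  unfold Spec_minhash_function
  obtain ⟨hlk, hzip⟩ := hpre
  cases lou with
  | nil => rfl
  | cons u0 rest =>
    set d := PySem.Dict.ofList uhl with hd
    have hch : pvChain d (u0 :: rest) := by
      intro p hp k hk
      simp only [pvUd] at hk ⊢
      exact (pv_mem_keys_ofList _ _).mpr (hzip p hp k ((pv_mem_keys_ofList _ _).mp hk))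
    have hc0 := hlk u0 (by simp)
    have h0 : pvAFold d (some PySem.Dict.empty) (0, u0) = some (pvUd d u0) := by
      unfold pvAFold
      rw [pv_get?_of_contains d u0 hc0]
      dsimp only
      rw [if_neg (by simp)]
      rfl
    have hheadcond : ∀ h ∈ rest.head?, ∀ k ∈ (pvUd d h).keys, k ∈ (pvUd d u0).keys := by
      intro h hh k hk
      cases rest with
      | nil => simp at hh
      | cons v vs =>
        have hv : v = h := by simpa using hh
        subst hv
        exact hch (u0, v) (by simp) k hk
    have hA : minhash_function (u0 :: rest) uhl = (pvALoop d (pvUd d u0) rest).items := by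
      unfold minhash_function
      rw [← hd, PySem.List.enumerate_cons, List.foldl_cons, h0,
          pv_ALoop d rest (pvUd d u0) (0 + 1) (by omega) (fun w hw => hlk w (by simp [hw]))
            hheadcond (pvChain_tail d u0 rest hch)]
    have hlastmem : (u0 :: rest).getLast (by simp) ∈ u0 :: rest := List.getLast_mem _
    have hclast := hlk _ hlastmem
    have hgetlast := pv_get?_of_contains d _ hclast
    have hallk : ∀ k ∈ (pvUd d ((u0 :: rest).getLast (by simp))).keys, ∀ w ∈ u0 :: rest,
        d.contains w = true ∧ k ∈ (pvUd d w).keys := by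
      intro k hk w hw
      exact ⟨hlk w hw, pvChain_last d rest u0 hch w hw k hk⟩
    have hminU : ∀ k ∈ (pvUd d ((u0 :: rest).getLast (by simp))).keys,
        pvMinOverUsers d (u0 :: rest) k =
          some (rest.foldl (fun m w => min m ((pvUd d w).getD k 0)) ((pvUd d u0).getD k 0)) := by
      intro k hk
      have h := hallk k hk
      exact pv_minOverUsers d k u0 rest (h u0 (by simp)).1 (h u0 (by simp)).2
        (fun w hw => h w (by simp [hw]))
    have hBitems : minhash_function_alt (u0 :: rest) uhl =
        (pvUd d ((u0 :: rest).getLast (by simp))).keys.map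
          (fun k => (k, rest.foldl (fun m w => min m ((pvUd d w).getD k 0)) ((pvUd d u0).getD k 0))) := by
      unfold minhash_function_alt
      rw [if_neg (by simp)]
      dsimp only [← hd]
      rw [← hd, PySem.List.pyGet?_neg_one, List.getLast?_eq_some_getLast (by simp)]
      dsimp only
      rw [hgetlast]
      dsimp only
      show (match List.foldl (pvBFold d (u0 :: rest)) (some PySem.Dict.empty)
              (pvUd d ((u0 :: rest).getLast (by simp))).keys with
            | some md => md.items
            | none => []) = _
      rw [pv_optFoldB d (u0 :: rest)
            (fun k => rest.foldl (fun m w => min m ((pvUd d w).getD k 0)) ((pvUd d u0).getD k 0))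
            (pvUd d ((u0 :: rest).getLast (by simp))).keys PySem.Dict.empty hminU]
      dsimp only
      exact pv_items_insertFold _ _ (PySem.Dict.nodup_keys_ofList _)
    rw [hA, hBitems]
    cases rest with
    | nil =>
      exact PySem.Dict.items_eq_map_keys _ (PySem.Dict.nodup_keys_ofList _) 0
    | cons r rs =>
      have hlast2 : (u0 :: r :: rs).getLast (by simp) = (r :: rs).getLast (by simp) := by
        simp [List.getLast_cons]
      rw [pv_items_pvALoop d rs r (pvUd d u0) (pvChain_tail d u0 _ hch)]
      simp only [hlast2]
      have hkeys_map : (pvUd d ((r :: rs).getLast (by simp))).keys.map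
            (fun k => (k, (r :: rs).foldl (fun m w => min m ((pvUd d w).getD k 0)) ((pvUd d u0).getD k 0)))
          = (pvUd d ((r :: rs).getLast (by simp))).items.map
            (fun kv => (kv.1, (r :: rs).foldl (fun m w => min m ((pvUd d w).getD kv.1 0)) ((pvUd d u0).getD kv.1 0))) := by
        show ((pvUd d ((r :: rs).getLast (by simp))).items.map Prod.fst).map _ = _
        rw [List.map_map]
        rfl
      rw [hkeys_map]
      symm
      apply List.map_congr_left
      intro kv _
      rw [pv_foldmin_comm]
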